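-- pv_equiv track=rewrite | github.com/VittuD/cowbook | src/cowbook/vision/cleanup/pruning.py | _compute_max_track_streak
-- ===== SOURCE A (Python) =====
-- def _compute_max_track_streak(frame_ids: list[int], gap_tolerance: int) -> int:
--     if not frame_ids:
--         return 0
--     best = 1
--     current = 1
--     for previous, current_frame in zip(frame_ids, frame_ids[1:]):
--         gap = current_frame - previous - 1
--         if gap <= gap_tolerance:
--             current += 1
--         else:
--             best = max(best, current)
--             current = 1
--     return max(best, current)
-- ===== SOURCE B (Python) =====
-- def _compute_max_track_streak(frame_ids: list[int], gap_tolerance: int) -> int: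
--     if not frame_ids:
--         return 0
--     breaks = [i for i, (prev, nxt) in enumerate(zip(frame_ids, frame_ids[1:]))
--               if nxt - prev - 1 > gap_tolerance]
--     cuts = [-1] + breaks + [len(frame_ids) - 1]
--     best = 0
--     for prev_cut, next_cut in zip(cuts, cuts[1:]):
--         best = max(best, next_cut - prev_cut)
--     return best
-- ===== Notes on version B (the rewrite author's own statement) =====
-- stated objective: alternative
-- what changed: B records the list of break positions (gaps exceeding the tolerance) and derives the longest streak arithmetically as the maximum difference of consecutive cut boundaries, instead of A's running best/current streak counters.
import Mathlib
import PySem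

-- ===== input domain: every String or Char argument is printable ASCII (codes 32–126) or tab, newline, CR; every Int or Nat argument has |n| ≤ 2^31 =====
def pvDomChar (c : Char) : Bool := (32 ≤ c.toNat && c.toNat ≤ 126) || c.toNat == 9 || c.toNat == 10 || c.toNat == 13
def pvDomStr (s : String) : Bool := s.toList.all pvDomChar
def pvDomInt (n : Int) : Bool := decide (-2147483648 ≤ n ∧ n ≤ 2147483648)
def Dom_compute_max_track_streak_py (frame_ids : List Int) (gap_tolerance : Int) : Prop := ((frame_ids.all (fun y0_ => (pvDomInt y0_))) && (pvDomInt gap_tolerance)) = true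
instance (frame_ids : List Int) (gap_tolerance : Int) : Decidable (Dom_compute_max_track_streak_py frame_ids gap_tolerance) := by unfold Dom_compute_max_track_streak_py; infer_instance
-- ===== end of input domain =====

-- B replaces A's running best/current streak counters by a table of break positions and
-- derives the longest streak as the maximum difference of consecutive cut boundaries (alternative decomposition, same cost).


-- ===== PORT A =====
-- xs[1:] on a list is List.drop 1 (exact: nonnegative literal start)
def compute_max_track_streak_py (frame_ids : List Int) (gap_tolerance : Int) : Int :=
  if frame_ids = [] then 0
  else
    let s := (frame_ids.zip (frame_ids.drop 1)).foldl
      (fun (s : Int × Int) p =>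
        let gap := p.2 - p.1 - 1
        if gap ≤ gap_tolerance then (s.1, s.2 + 1) else (max s.1 s.2, 1))
      (1, 1)
    max s.1 s.2

-- ===== PORT B =====
def compute_max_track_streak_py_alt (frame_ids : List Int) (gap_tolerance : Int) : Int :=
  if frame_ids = [] then 0
  else
    let breaks := ((PySem.List.enumerate (frame_ids.zip (frame_ids.drop 1)) 0).filter
        (fun p => p.2.2 - p.2.1 - 1 > gap_tolerance)).map (·.1)
    let cuts := (-1 : Int) :: (breaks ++ [(frame_ids.length : Int) - 1])
    (cuts.zip (cuts.drop 1)).foldl (fun best p => max best (p.2 - p.1)) 0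

-- ===== PRECONDITION & SPEC =====
def Spec_compute_max_track_streak_py (frame_ids : List Int) (gap_tolerance : Int) (out : Int) : Prop := out = compute_max_track_streak_py_alt frame_ids gap_tolerance
instance (frame_ids : List Int) (gap_tolerance : Int) (out : Int) : Decidable (Spec_compute_max_track_streak_py frame_ids gap_tolerance out) := by unfold Spec_compute_max_track_streak_py; infer_instance

-- ===== CLAIM (what is proved, stated in full; the proofs are below) =====
def Claim_equal_compute_max_track_streak_py : Prop := ∀ (frame_ids : List Int) (gap_tolerance : Int), Dom_compute_max_track_streak_py frame_ids gap_tolerance → Spec_compute_max_track_streak_py frame_ids gap_tolerance (compute_max_track_streak_py frame_ids gap_tolerance)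

-- ===== LEMMAS AND PROOFS =====

/-- Maximum segment length of a break-flag list, with `c` the length of the open leading segment. -/
def maxSeg (c : Int) : List Bool → Int
  | [] => c
  | false :: bs => maxSeg (c + 1) bs
  | true :: bs => max c (maxSeg 1 bs)

/-- Positions (starting at `i`) of the `true` flags. -/
def posTrues (i : Int) : List Bool → List Int
  | [] => []
  | true :: bs => i :: posTrues (i + 1) bs
  | false :: bs => posTrues (i + 1) bs

/-- Running max of consecutive differences along `prev :: cs`. -/
def gMax (b prev : Int) : List Int → Int
  | [] => b
  | c :: cs => gMax (max b (c - prev)) c cs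

lemma le_maxSeg (bs : List Bool) : ∀ c : Int, c ≤ maxSeg c bs := by
  induction bs with
  | nil => intro c; simp [maxSeg]
  | cons b bs ih =>
    intro c
    cases b <;> simp only [maxSeg]
    · exact le_trans (by omega) (ih (c + 1))
    · exact le_max_left _ _

/-- A's fold, started at `(b, c)`, finished with a `max`, computes `max b (maxSeg c flags)`. -/
lemma foldA_eq (tol : Int) (l : List (Int × Int)) : ∀ b c : Int,
    max (l.foldl
        (fun (s : Int × Int) p =>
          let gap := p.2 - p.1 - 1
          if gap ≤ tol then (s.1, s.2 + 1) else (max s.1 s.2, 1))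
        (b, c)).1
      (l.foldl
        (fun (s : Int × Int) p =>
          let gap := p.2 - p.1 - 1
          if gap ≤ tol then (s.1, s.2 + 1) else (max s.1 s.2, 1))
        (b, c)).2
      = max b (maxSeg c (l.map (fun p => decide (p.2 - p.1 - 1 > tol)))) := by
  induction l with
  | nil => intro b c; simp [maxSeg]
  | cons p l ih =>
    intro b c
    by_cases h : p.2 - p.1 - 1 ≤ tol
    · have hf : decide (p.2 - p.1 - 1 > tol) = false := by simp; omega
      simp only [List.foldl_cons, List.map_cons, hf, if_pos h, maxSeg]
      exact ih b (c + 1)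
    · have hf : decide (p.2 - p.1 - 1 > tol) = true := by simp; omega
      simp only [List.foldl_cons, List.map_cons, hf, if_neg h, maxSeg]
      rw [ih (max b c) 1]
      rw [max_assoc]

/-- B's fold over consecutive pairs of `prev :: cs` is `gMax`. -/
lemma foldB_eq (cs : List Int) : ∀ b prev : Int,
    (((prev :: cs).zip cs).foldl (fun best p => max best (p.2 - p.1)) b) = gMax b prev cs := by
  induction cs with
  | nil => intro b prev; simp [gMax]
  | cons c cs ih =>
    intro b prev
    simp only [List.zip_cons_cons, List.foldl_cons, gMax]
    exact ih (max b (c - prev)) c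

/-- Filtered enumeration projected to indices is `posTrues` of the flag list. -/
lemma breaks_eq (tol : Int) (l : List (Int × Int)) : ∀ i : Int,
    ((PySem.List.enumerate l i).filter (fun p => p.2.2 - p.2.1 - 1 > tol)).map (·.1)
      = posTrues i (l.map (fun p => decide (p.2 - p.1 - 1 > tol))) := by
  induction l with
  | nil => intro i; simp [PySem.List.enumerate_nil, posTrues]
  | cons p l ih =>
    intro i
    rw [PySem.List.enumerate_cons]
    by_cases h : p.2 - p.1 - 1 > tol
    · have hf : decide (p.2 - p.1 - 1 > tol) = true := by simpa using h
      simp [hf, posTrues, ih (i + 1)]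
    · have hf : decide (p.2 - p.1 - 1 > tol) = false := by simpa using h
      simp [hf, posTrues, ih (i + 1)]

/-- `gMax` over `posTrues i bs ++ [i + |bs|]` is `max b (maxSeg (i - prev) bs)`. -/
lemma gMax_posTrues (bs : List Bool) : ∀ b prev i : Int,
    gMax b prev (posTrues i bs ++ [i + bs.length]) = max b (maxSeg (i - prev) bs) := by
  induction bs with
  | nil => intro b prev i; simp [posTrues, gMax, maxSeg]
  | cons x bs ih =>
    intro b prev i
    cases x
    · simp only [posTrues, maxSeg, List.length_cons]
      push_cast
      rw [show ((i : Int) + (↑bs.length + 1)) = (i + 1) + ↑bs.length by ring]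
      rw [show (i : Int) - prev + 1 = (i + 1) - prev by ring]
      exact ih b prev (i + 1)
    · simp only [posTrues, maxSeg, List.length_cons, List.cons_append, gMax]
      push_cast
      rw [show ((i : Int) + (↑bs.length + 1)) = (i + 1) + ↑bs.length by ring]
      have h2 := ih (max b (i - prev)) i (i + 1)
      rw [show ((i : Int) + 1) - i = 1 by ring] at h2
      rw [h2, max_assoc]

-- ===== VERDICT (by name: the statement is the Claim_ definition above) =====
theorem compute_max_track_streak_py_spec : Claim_equal_compute_max_track_streak_py := by
  intro xs tol _
  unfold Spec_compute_max_track_streak_py compute_max_track_streak_py compute_max_track_streak_py_alt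
  by_cases hnil : xs = []
  · simp [hnil]
  · simp only [if_neg hnil]
    set l := xs.zip (xs.drop 1) with hl
    set bs := l.map (fun p => decide (p.2 - p.1 - 1 > tol)) with hbs
    have hlen : (bs.length : Int) = (xs.length : Int) - 1 := by
      have h1 : l.length = min xs.length (xs.length - 1) := by
        rw [hl, List.length_zip, List.length_drop]
      have h0 : xs.length ≠ 0 := by simpa using hnil
      have : bs.length = xs.length - 1 := by
        rw [hbs, List.length_map, h1]; omega
      rw [this]; omega
    rw [foldA_eq tol l 1 1]
    rw [breaks_eq tol l 0]
    have hcuts : ((-1 : Int) :: (posTrues 0 bs ++ [(xs.length : Int) - 1])).zip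
          (((-1 : Int) :: (posTrues 0 bs ++ [(xs.length : Int) - 1])).drop 1)
        = ((-1 : Int) :: (posTrues 0 bs ++ [(xs.length : Int) - 1])).zip
          (posTrues 0 bs ++ [(xs.length : Int) - 1]) := by simp
    rw [hcuts, foldB_eq]
    rw [show ((xs.length : Int) - 1) = 0 + (bs.length : Int) by omega]
    rw [gMax_posTrues bs 0 (-1) 0, show ((0 : Int) - -1) = 1 by norm_num, ← hbs]
    have h1 : (1 : Int) ≤ maxSeg 1 bs := le_maxSeg bs 1
    omega
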